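-- pv_equiv track=rewrite | github.com/Shogun6855/signlanguage-german-text2sign | backend/ingest_conversation.py | _find_best_segment
-- ===== SOURCE A (Python) =====
-- def _find_best_segment(all_segs: list[dict], g_start: int, g_end: int) -> dict | None:
--     """Find the segment whose time range best contains the gloss interval."""
--     # Filter to segments from the same time neighborhood (avoid cross-conversation matches)
--     # We use "best overlap" within segments that share the same source (start_ms ballpark)
--     for seg in all_segs:
--         if seg["start_ms"] <= g_start and seg["end_ms"] >= g_end:
--             return seg        # exact containment
--     best, best_ov = None, 0
--     for seg in all_segs:
--         ov = min(g_end, seg["end_ms"]) - max(g_start, seg["start_ms"])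
--         if ov > best_ov:
--             best_ov = ov
--             best = seg
--     return best
-- ===== SOURCE B (Python) =====
-- def _find_best_segment(all_segs: list[dict], g_start: int, g_end: int) -> dict | None:
--     """Single pass: return the first fully containing segment immediately;
--     otherwise track the best strictly-positive overlap seen so far."""
--     best, best_ov = None, 0
--     for seg in all_segs:
--         if seg["start_ms"] <= g_start and seg["end_ms"] >= g_end:
--             return seg
--         ov = min(g_end, seg["end_ms"]) - max(g_start, seg["start_ms"])
--         if ov > best_ov:
--             best, best_ov = seg, ov
--     return best
-- ===== Notes on version B (the rewrite author's own statement) =====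
-- stated objective: simpler
-- what changed: Replaces A's two sequential scans (one for containment, one accumulating best overlap) by a single loop that returns on the first containing segment and otherwise maintains the best-overlap accumulator, halving the traversals and the code.
import Mathlib
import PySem

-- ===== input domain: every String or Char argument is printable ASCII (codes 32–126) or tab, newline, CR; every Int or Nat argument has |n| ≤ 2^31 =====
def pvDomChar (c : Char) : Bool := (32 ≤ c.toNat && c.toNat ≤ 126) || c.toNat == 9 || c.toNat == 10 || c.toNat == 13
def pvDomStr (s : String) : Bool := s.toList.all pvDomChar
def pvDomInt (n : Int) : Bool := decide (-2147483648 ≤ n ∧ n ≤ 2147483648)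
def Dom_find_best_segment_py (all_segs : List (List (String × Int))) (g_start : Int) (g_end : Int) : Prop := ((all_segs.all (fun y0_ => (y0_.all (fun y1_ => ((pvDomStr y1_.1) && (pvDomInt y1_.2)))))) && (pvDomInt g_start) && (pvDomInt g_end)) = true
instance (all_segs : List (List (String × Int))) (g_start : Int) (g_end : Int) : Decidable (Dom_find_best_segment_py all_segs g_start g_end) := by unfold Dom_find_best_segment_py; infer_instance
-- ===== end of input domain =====

-- B fuses A's two sequential scans into one loop (return on first containment, else track best overlap): simpler, one pass.
-- Pre_ excludes the inputs on which Python raises KeyError (a segment missing "start_ms" or "end_ms"):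
-- it admits lists where every segment has both keys, or where a containing segment precedes any key-less one
-- (both programs return it before the failing lookup); excluded with it are a few inputs where A's
-- short-circuited `and` skips a missing "end_ms" and returns while B's overlap step naturally raises there.


-- dict lookup seg[k]: first match in insertion order; Pre_ guarantees the key exists, so getD's default never fires
def segGet (seg : List (String × Int)) (k : String) : Option Int :=
  (seg.find? (fun p => p.1 == k)).map (·.2)

def startMs (seg : List (String × Int)) : Int := (segGet seg "start_ms").getD 0
def endMs (seg : List (String × Int)) : Int := (segGet seg "end_ms").getD 0

-- ===== PORT A =====
-- first loop: return first fully containing segment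
def fbsContain (all_segs : List (List (String × Int))) (g_start : Int) (g_end : Int) : Option (List (String × Int)) :=
  match all_segs with
  | [] => none
  | seg :: rest =>
      if startMs seg ≤ g_start ∧ g_end ≤ endMs seg then some seg
      else fbsContain rest g_start g_end

-- second loop: accumulate (best, best_ov)
def fbsStep (g_start : Int) (g_end : Int) (acc : Option (List (String × Int)) × Int) (seg : List (String × Int)) : Option (List (String × Int)) × Int :=
  let ov := min g_end (endMs seg) - max g_start (startMs seg)
  if ov > acc.2 then (some seg, ov) else acc

def find_best_segment_py (all_segs : List (List (String × Int))) (g_start : Int) (g_end : Int) : Option (List (String × Int)) :=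
  match fbsContain all_segs g_start g_end with
  | some seg => some seg
  | none => (all_segs.foldl (fbsStep g_start g_end) (none, 0)).1

-- ===== PORT B =====
-- single pass: return on first containment, otherwise keep best overlap so far
def fbsGo (all_segs : List (List (String × Int))) (g_start : Int) (g_end : Int) (best : Option (List (String × Int))) (best_ov : Int) : Option (List (String × Int)) :=
  match all_segs with
  | [] => best
  | seg :: rest =>
      if startMs seg ≤ g_start ∧ g_end ≤ endMs seg then some seg
      else
        let ov := min g_end (endMs seg) - max g_start (startMs seg)
        if ov > best_ov then fbsGo rest g_start g_end (some seg) ov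
        else fbsGo rest g_start g_end best best_ov

def find_best_segment_py_alt (all_segs : List (List (String × Int))) (g_start : Int) (g_end : Int) : Option (List (String × Int)) :=
  fbsGo all_segs g_start g_end none 0

-- ===== PRECONDITION & SPEC =====
-- Pre_ excludes inputs where some segment lacks a "start_ms" or "end_ms" key: Python raises KeyError there
-- (except when an earlier segment already contains the interval, in which case A and B agree anyway).
def Pre_find_best_segment_py (all_segs : List (List (String × Int))) (g_start : Int) (g_end : Int) : Prop :=
  (∀ seg ∈ all_segs, (segGet seg "start_ms").isSome ∧ (segGet seg "end_ms").isSome)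
  ∨ (∃ i < all_segs.length,
       ((segGet (all_segs.getD i []) "start_ms").isSome ∧ startMs (all_segs.getD i []) ≤ g_start ∧
        (segGet (all_segs.getD i []) "end_ms").isSome ∧ g_end ≤ endMs (all_segs.getD i [])) ∧
       ∀ j < i, (segGet (all_segs.getD j []) "start_ms").isSome ∧
         (segGet (all_segs.getD j []) "end_ms").isSome)

instance (all_segs : List (List (String × Int))) (g_start : Int) (g_end : Int) : Decidable (Pre_find_best_segment_py all_segs g_start g_end) := by unfold Pre_find_best_segment_py; infer_instance

def pvWitness_find_best_segment_py : (List (List (String × Int))) × Int × Int :=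
  ([[("start_ms", 0), ("end_ms", 10)], [("start_ms", 4), ("end_ms", 6)]], 3, 7)

def Spec_find_best_segment_py (all_segs : List (List (String × Int))) (g_start : Int) (g_end : Int) (out : Option (List (String × Int))) : Prop := out = find_best_segment_py_alt all_segs g_start g_end
instance (all_segs : List (List (String × Int))) (g_start : Int) (g_end : Int) (out : Option (List (String × Int))) : Decidable (Spec_find_best_segment_py all_segs g_start g_end out) := by unfold Spec_find_best_segment_py; infer_instance

-- ===== CLAIM (what is proved, stated in full; the proofs are below) =====
def Claim_equal_find_best_segment_py : Prop := ∀ (all_segs : List (List (String × Int))) (g_start : Int) (g_end : Int), Dom_find_best_segment_py all_segs g_start g_end → Pre_find_best_segment_py all_segs g_start g_end → Spec_find_best_segment_py all_segs g_start g_end (find_best_segment_py all_segs g_start g_end)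

-- ===== LEMMAS AND PROOFS =====

-- B's single pass equals: first containment if any, else A's fold continued from the accumulator.
theorem fbsGo_eq (g_start g_end : Int) :
    ∀ (segs : List (List (String × Int))) (best : Option (List (String × Int))) (best_ov : Int),
      fbsGo segs g_start g_end best best_ov =
        match fbsContain segs g_start g_end with
        | some s => some s
        | none => (segs.foldl (fbsStep g_start g_end) (best, best_ov)).1 := by
  intro segs
  induction segs with
  | nil => intro best best_ov; simp [fbsGo, fbsContain]
  | cons seg rest ih =>
      intro best best_ov
      simp only [fbsGo, fbsContain, List.foldl_cons]
      by_cases h : startMs seg ≤ g_start ∧ g_end ≤ endMs seg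
      · simp [h]
      · simp only [if_neg h]
        by_cases hov : min g_end (endMs seg) - max g_start (startMs seg) > best_ov
        · have : fbsStep g_start g_end (best, best_ov) seg
              = (some seg, min g_end (endMs seg) - max g_start (startMs seg)) := by
            simp [fbsStep, hov]
          rw [ih, this, if_pos hov]
        · have : fbsStep g_start g_end (best, best_ov) seg = (best, best_ov) := by
            simp [fbsStep, hov]
          rw [this, if_neg hov]
          exact ih best best_ov

-- ===== VERDICT (by name: the statement is the Claim_ definition above) =====
theorem find_best_segment_py_spec : Claim_equal_find_best_segment_py := by
  intro all_segs g_start g_end _ _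
  unfold Spec_find_best_segment_py find_best_segment_py find_best_segment_py_alt
  rw [fbsGo_eq]
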